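-- pv_equiv track=rewrite | github.com/Blittz/Pi5-Photo-Viewer | ui/main_window.py | normalize_transition_keys
-- ===== SOURCE A (Python) =====
-- TRANSITION_OPTIONS = [
--     ("Crossfade", "crossfade"),
--     ("Slide (Horizontal)", "slide-horizontal"),
--     ("Slide (Vertical)", "slide-vertical"),
--     ("Zoom", "zoom"),
--     ("Carousel", "carousel"),
--     ("Mosaic", "mosaic"),
--     ("Pixelate", "pixelate"),
-- ]
--
-- LEGACY_TRANSITION_ALIASES = {
--     "slide": ["slide-horizontal", "slide-vertical"],
-- }
--
-- def normalize_transition_keys(keys):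
--     if not keys:
--         return []
--
--     if isinstance(keys, str):
--         keys = [keys]
--
--     valid_keys = {key for _, key in TRANSITION_OPTIONS}
--     normalized = []
--     for key in keys:
--         if not isinstance(key, str):
--             continue
--         key = key.strip().lower()
--         if key in valid_keys:
--             if key not in normalized:
--                 normalized.append(key)
--         elif key in LEGACY_TRANSITION_ALIASES:
--             for alias in LEGACY_TRANSITION_ALIASES[key]:
--                 if alias not in normalized:
--                     normalized.append(alias)
--     return normalized
-- ===== SOURCE B (Python) =====
-- TRANSITION_OPTIONS = [
--     ("Crossfade", "crossfade"),
--     ("Slide (Horizontal)", "slide-horizontal"),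
--     ("Slide (Vertical)", "slide-vertical"),
--     ("Zoom", "zoom"),
--     ("Carousel", "carousel"),
--     ("Mosaic", "mosaic"),
--     ("Pixelate", "pixelate"),
-- ]
--
-- LEGACY_TRANSITION_ALIASES = {
--     "slide": ["slide-horizontal", "slide-vertical"],
-- }
--
--
-- def normalize_transition_keys(keys):
--     if not keys:
--         return []
--     if isinstance(keys, str):
--         keys = [keys]
--     valid_keys = [key for _, key in TRANSITION_OPTIONS]
--     # Flat stream of canonical targets contributed by the input, duplicates and all.
--     stream = []
--     for key in keys:
--         if not isinstance(key, str):
--             continue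
--         key = key.strip().lower()
--         if key in valid_keys:
--             stream.append(key)
--         else:
--             stream.extend(LEGACY_TRANSITION_ALIASES.get(key, []))
--     # Select from the fixed catalog the targets that occur at all, ordered by
--     # the position of their first occurrence in the stream (no dedup pass needed:
--     # the catalog already lists each canonical key exactly once).
--     return sorted((t for t in valid_keys if t in stream), key=stream.index)
-- ===== Notes on version B (the rewrite author's own statement) =====
-- stated objective: alternative
-- what changed: A's append-if-absent accumulator is replaced by: build the flat stream of contributed canonical keys, then select from the fixed 7-key catalog the keys present in the stream and order them by the index of their first occurrence (sorted with key=stream.index); no dedup structure is kept at all.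
import Mathlib
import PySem

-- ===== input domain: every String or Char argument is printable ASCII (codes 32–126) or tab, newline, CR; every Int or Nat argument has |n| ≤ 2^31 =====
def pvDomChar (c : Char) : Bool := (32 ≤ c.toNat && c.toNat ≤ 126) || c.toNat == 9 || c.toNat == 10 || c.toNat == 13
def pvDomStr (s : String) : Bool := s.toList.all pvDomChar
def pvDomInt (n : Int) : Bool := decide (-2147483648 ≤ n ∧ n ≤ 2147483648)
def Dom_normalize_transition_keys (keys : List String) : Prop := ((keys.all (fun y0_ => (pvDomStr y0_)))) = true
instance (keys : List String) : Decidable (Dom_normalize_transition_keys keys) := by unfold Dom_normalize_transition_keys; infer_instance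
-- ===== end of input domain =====

-- B replaces A's append-if-absent accumulation by selecting from the fixed catalog the keys whose
-- first contribution occurs, ordered by first-occurrence index (alternative decomposition, not faster).

def TRANSITION_OPTIONS : List (String × String) :=
  [("Crossfade", "crossfade"),
   ("Slide (Horizontal)", "slide-horizontal"),
   ("Slide (Vertical)", "slide-vertical"),
   ("Zoom", "zoom"),
   ("Carousel", "carousel"),
   ("Mosaic", "mosaic"),
   ("Pixelate", "pixelate")]

def LEGACY_TRANSITION_ALIASES : PySem.Dict String (List String) :=
  PySem.Dict.ofList [("slide", ["slide-horizontal", "slide-vertical"])]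

-- ===== PORT A =====
-- 'if x not in normalized: normalized.append(x)'
def pvAstep (normalized : List String) (a : String) : List String :=
  if normalized.contains a then normalized else normalized ++ [a]

def pvAloop (valid : PySem.Set String) (normalized : List String) : List String → List String
  | [] => normalized
  | key :: rest =>
    let k := PySem.Str.lower (PySem.Str.strip key)
    let normalized' :=
      if PySem.Set.contains valid k then pvAstep normalized k
      else
        match PySem.Dict.get? LEGACY_TRANSITION_ALIASES k with
        | some aliases => aliases.foldl pvAstep normalized
        | none => normalized
    pvAloop valid normalized' rest

def normalize_transition_keys (keys : List String) : List String :=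
  if keys.isEmpty then []
  else pvAloop (PySem.Set.ofList (TRANSITION_OPTIONS.map (fun p => p.2))) [] keys

-- ===== PORT B =====
-- the flat stream of canonical targets contributed by the input, duplicates kept
def pvStream (valid : List String) (keys : List String) : List String :=
  keys.foldl
    (fun acc key =>
      let k := PySem.Str.lower (PySem.Str.strip key)
      if valid.contains k then acc ++ [k]
      else acc ++ PySem.Dict.getD LEGACY_TRANSITION_ALIASES k [])
    []

-- sorted((t for t in valid if t in stream), key=stream.index); the '.getD 0' of the key is exact
-- because every selected t is a member of the stream (stream.index never raises here)
def normalize_transition_keys_alt (keys : List String) : List String :=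
  if keys.isEmpty then []
  else
    let valid := TRANSITION_OPTIONS.map (fun p => p.2)
    let stream := pvStream valid keys
    PySem.List.sorted (valid.filter (fun t => stream.contains t))
      (fun t => (PySem.List.index? stream t).getD 0) false

-- ===== PRECONDITION & SPEC =====
def Spec_normalize_transition_keys (keys : List String) (out : List String) : Prop := out = normalize_transition_keys_alt keys
instance (keys : List String) (out : List String) : Decidable (Spec_normalize_transition_keys keys out) := by unfold Spec_normalize_transition_keys; infer_instance

-- ===== CLAIM (what is proved, stated in full; the proofs are below) =====
def Claim_equal_normalize_transition_keys : Prop := ∀ (keys : List String), Dom_normalize_transition_keys keys → Spec_normalize_transition_keys keys (normalize_transition_keys keys)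

-- ===== LEMMAS AND PROOFS =====

-- the contribution of one (already stripped/lowered) key to the stream
def pvContrib (valid : List String) (k : String) : List String :=
  if valid.contains k then [k]
  else PySem.Dict.getD LEGACY_TRANSITION_ALIASES k []

lemma pvStream_eq_flatMap (valid keys : List String) :
    pvStream valid keys
      = keys.flatMap (fun key => pvContrib valid (PySem.Str.lower (PySem.Str.strip key))) := by
  unfold pvStream
  rw [show (fun (acc : List String) key =>
        let k := PySem.Str.lower (PySem.Str.strip key)
        if valid.contains k then acc ++ [k]
        else acc ++ PySem.Dict.getD LEGACY_TRANSITION_ALIASES k [])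
      = (fun acc key => acc ++ pvContrib valid (PySem.Str.lower (PySem.Str.strip key))) from by
    funext acc key; simp only [pvContrib]; split <;> rfl]
  simpa using PySem.List.foldl_append_eq_flatMap _ keys []

lemma pvGetLegacy (k : String) :
    PySem.Dict.get? LEGACY_TRANSITION_ALIASES k
      = if k == "slide" then some ["slide-horizontal", "slide-vertical"] else none := by
  simp only [LEGACY_TRANSITION_ALIASES, PySem.Dict.ofList, PySem.Dict.get?, PySem.Dict.update,
    PySem.Dict.insert, PySem.Dict.empty]
  split <;> simp_all
  exact fun h => ‹¬_ = "slide"› h.symm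

-- A's interleaved loop is the fold of Set.add over the flat stream
lemma pvAloop_eq_foldl (valid : List String) (res keys : List String) :
    pvAloop (PySem.Set.ofList valid) res keys
      = (keys.flatMap (fun key => pvContrib valid (PySem.Str.lower (PySem.Str.strip key)))).foldl pvAstep res := by
  induction keys generalizing res with
  | nil => rfl
  | cons key rest ih =>
    simp only [pvAloop, List.flatMap_cons, List.foldl_append]
    rw [ih]
    congr 1
    simp only [pvContrib]
    rw [show PySem.Set.contains (PySem.Set.ofList valid) (PySem.Str.lower (PySem.Str.strip key))
          = valid.contains (PySem.Str.lower (PySem.Str.strip key)) from by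
      by_cases h : PySem.Str.lower (PySem.Str.strip key) ∈ valid <;>
        simp [PySem.Set.contains, PySem.Set.mem_ofList, h]]
    split
    · rfl
    · rw [show PySem.Dict.getD LEGACY_TRANSITION_ALIASES (PySem.Str.lower (PySem.Str.strip key)) []
            = (PySem.Dict.get? LEGACY_TRANSITION_ALIASES (PySem.Str.lower (PySem.Str.strip key))).getD [] from rfl]
      cases PySem.Dict.get? LEGACY_TRANSITION_ALIASES (PySem.Str.lower (PySem.Str.strip key)) <;> rfl

-- every stream element is a catalog key
lemma pvStream_subset (keys : List String) (x : String)
    (hx : x ∈ pvStream (TRANSITION_OPTIONS.map (fun p => p.2)) keys) :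
    x ∈ TRANSITION_OPTIONS.map (fun p => p.2) := by
  rw [pvStream_eq_flatMap] at hx
  obtain ⟨key, -, hmem⟩ := List.mem_flatMap.mp hx
  revert hmem
  unfold pvContrib
  split
  · rename_i h
    intro hm
    rw [List.mem_singleton.mp hm]
    simpa [List.contains_iff_mem] using h
  · rw [show PySem.Dict.getD LEGACY_TRANSITION_ALIASES (PySem.Str.lower (PySem.Str.strip key)) []
          = (PySem.Dict.get? LEGACY_TRANSITION_ALIASES (PySem.Str.lower (PySem.Str.strip key))).getD [] from rfl,
      pvGetLegacy]
    split
    · intro hm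
      simp only [Option.getD_some, List.mem_cons, List.not_mem_nil, or_false] at hm
      rcases hm with rfl | rfl <;> decide
    · intro hm; simp at hm

-- first-occurrence index (the sort key of B)
def pvIdx (l : List String) (t : String) : Nat := (PySem.List.index? l t).getD 0

lemma pvIdx_cons_of_mem (x b : String) (l : List String) (hne : b ≠ x) (hb : b ∈ l) :
    pvIdx (x :: l) b = pvIdx l b + 1 := by
  obtain ⟨k, hk⟩ := Option.isSome_iff_exists.mp ((PySem.List.index?_isSome_iff l b).mpr hb)
  unfold pvIdx
  rw [PySem.List.index?_cons_of_ne l (fun h => hne h.symm), hk]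
  rfl

-- ofList splits off its head
lemma pvFoldl_add (acc : List String) (xs : List String) :
    xs.foldl PySem.Set.add acc = acc ++ (PySem.Set.ofList xs).filter (fun y => !acc.contains y) := by
  induction xs generalizing acc with
  | nil => simp [PySem.Set.ofList]
  | cons x xs ih =>
    have hofl : PySem.Set.ofList (x :: xs)
        = [x] ++ (PySem.Set.ofList xs).filter (fun y => !([x] : List String).contains y) := by
      show (x :: xs).foldl PySem.Set.add [] = _
      rw [List.foldl_cons]
      exact ih [x]
    rw [List.foldl_cons, show PySem.Set.add acc x = if acc.contains x then acc else acc ++ [x] from rfl]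
    rw [hofl, List.filter_append, List.filter_filter]
    by_cases hm : x ∈ acc
    · have hc : acc.contains x = true := by simpa [List.contains_iff_mem] using hm
      rw [if_pos hc, ih acc]
      have h1 : ([x] : List String).filter (fun y => !acc.contains y) = [] := by
        simp [hm]
      rw [h1, List.nil_append]
      congr 1
      apply List.filter_congr
      intro y _
      by_cases hyx : y = x
      · subst hyx; simp [hm]
      · simp [hyx]
    · have hc : ¬ acc.contains x = true := by simpa [List.contains_iff_mem] using hm
      rw [if_neg hc, ih (acc ++ [x])]
      have h1 : ([x] : List String).filter (fun y => !acc.contains y) = [x] := by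
        simp [hm]
      rw [h1, List.append_assoc]
      congr 2
      apply List.filter_congr
      intro y _
      by_cases hyx : y = x
      · subst hyx; simp
      · simp [hyx]

lemma pvOfList_cons (x : String) (xs : List String) :
    PySem.Set.ofList (x :: xs) = x :: (PySem.Set.ofList xs).filter (fun y => !(y == x)) := by
  show (x :: xs).foldl PySem.Set.add [] = _
  rw [List.foldl_cons, show PySem.Set.add [] x = [x] from rfl, pvFoldl_add [x] xs]
  simp only [List.singleton_append, List.cons.injEq, true_and]
  apply List.filter_congr
  intro y _
  by_cases h : y = x <;> simp [h]

-- the dedup of a list is strictly increasing in first-occurrence index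
lemma pvOfList_pairwise (xs : List String) :
    (PySem.Set.ofList xs).Pairwise (fun a b => pvIdx xs a < pvIdx xs b) := by
  induction xs with
  | nil => simp [PySem.Set.ofList]
  | cons x xs ih =>
    rw [pvOfList_cons]
    constructor
    · intro b hb
      have hbne : b ≠ x := by
        have := List.of_mem_filter hb
        simpa [beq_iff_eq] using this
      have hbmem : b ∈ xs := (PySem.Set.mem_ofList xs b).mp (List.mem_of_mem_filter hb)
      have h0 : pvIdx (x :: xs) x = 0 := by
        unfold pvIdx; rw [PySem.List.index?_cons_self]; rfl
      rw [h0, pvIdx_cons_of_mem x b xs hbne hbmem]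
      omega
    · refine List.Pairwise.imp_of_mem ?_ (List.Pairwise.filter _ ih)
      intro a b ha hb hab
      have hane : a ≠ x := by
        have := List.of_mem_filter ha; simpa [beq_iff_eq] using this
      have hbne : b ≠ x := by
        have := List.of_mem_filter hb; simpa [beq_iff_eq] using this
      have ham : a ∈ xs := (PySem.Set.mem_ofList xs a).mp (List.mem_of_mem_filter ha)
      have hbm : b ∈ xs := (PySem.Set.mem_ofList xs b).mp (List.mem_of_mem_filter hb)
      rw [pvIdx_cons_of_mem x a xs hane ham, pvIdx_cons_of_mem x b xs hbne hbm]
      omega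

-- ===== VERDICT (by name: the statement is the Claim_ definition above) =====
theorem normalize_transition_keys_spec : Claim_equal_normalize_transition_keys := by
  intro keys _
  unfold Spec_normalize_transition_keys normalize_transition_keys normalize_transition_keys_alt
  by_cases he : keys.isEmpty
  · simp [he]
  · rw [if_neg he, if_neg he]
    rw [pvAloop_eq_foldl, ← pvStream_eq_flatMap]
    have hset : (pvStream (TRANSITION_OPTIONS.map (fun p => p.2)) keys).foldl pvAstep []
        = PySem.Set.ofList (pvStream (TRANSITION_OPTIONS.map (fun p => p.2)) keys) := by
      rw [show pvAstep = PySem.Set.add from funext fun s => funext fun a => rfl]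
      rfl
    rw [hset]
    symm
    apply PySem.List.sorted_eq_of_perm_of_pairwise_lt
    · apply (List.perm_ext_iff_of_nodup (PySem.Set.nodup_ofList _)
        (List.Nodup.filter _ (by decide))).mpr
      intro a
      rw [PySem.Set.mem_ofList, List.mem_filter]
      constructor
      · intro ha
        exact ⟨pvStream_subset keys a ha, by simpa [List.contains_iff_mem] using ha⟩
      · intro h
        simpa [List.contains_iff_mem] using h.2
    · simpa [pvIdx] using pvOfList_pairwise (pvStream (TRANSITION_OPTIONS.map (fun p => p.2)) keys)
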